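-- pv_equiv track=rewrite | github.com/AnshumanPM/StreamSite | helper.py | hide_name
-- ===== SOURCE A (Python) =====
-- def hide_name(name):
--     words = name.split()
--     hidden_words = []
--     for word in words:
--         if len(word) > 4:
--             hidden_word = word[:2] + "***" + word[-2:]
--         else:
--             hidden_word = word
--         hidden_words.append(hidden_word)
--     return " ".join(hidden_words)
-- ===== SOURCE B (Python) =====
-- def _mask(run):
--     if len(run) > 4:
--         return "".join(run[:2]) + "***" + "".join(run[-2:])
--     return "".join(run)
--
-- def hide_name(name):
--     pieces = []
--     run = []
--     for ch in name:
--         if ch.isspace():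
--             if run:
--                 pieces.append(_mask(run))
--                 run = []
--         else:
--             run.append(ch)
--     if run:
--         pieces.append(_mask(run))
--     return " ".join(pieces)
-- ===== Notes on version B (the rewrite author's own statement) =====
-- stated objective: alternative
-- what changed: Replaces A's split()/per-word-loop/join pipeline with a single character-level scan that accumulates non-whitespace runs and masks each run as it ends.
import Mathlib
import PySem

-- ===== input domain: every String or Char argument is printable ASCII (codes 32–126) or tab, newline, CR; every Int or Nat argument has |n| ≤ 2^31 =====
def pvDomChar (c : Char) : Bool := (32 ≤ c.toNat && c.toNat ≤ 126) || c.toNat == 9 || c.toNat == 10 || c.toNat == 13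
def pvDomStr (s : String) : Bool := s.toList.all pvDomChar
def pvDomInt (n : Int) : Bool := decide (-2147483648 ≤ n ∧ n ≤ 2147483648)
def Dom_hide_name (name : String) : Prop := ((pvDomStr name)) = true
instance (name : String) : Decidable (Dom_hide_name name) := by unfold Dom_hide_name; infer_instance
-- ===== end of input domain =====

-- B replaces A's split/per-word-loop/join with a single character-level scan that masks
-- each non-whitespace run as it ends (objective: alternative, same cost).

-- ===== PORT A =====
-- words = name.split(); for word: mask long words; " ".join
def hide_name (name : String) : String :=
  let words := PySem.Str.split₀ name
  let hidden_words := words.foldl (fun acc word =>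
    acc ++ [if PySem.Str.len word > 4 then
              PySem.Str.slice word none (some 2) ++ "***" ++ PySem.Str.slice word (some (-2)) none
            else word]) []
  PySem.Str.join " " hidden_words

-- ===== PORT B =====
-- _mask(run): mask a completed run of non-whitespace characters
def pvMaskB (run : List Char) : List Char :=
  if run.length > 4 then run.take 2 ++ ['*', '*', '*'] ++ run.drop (run.length - 2) else run

-- the for-loop over the characters of name, state = (run, pieces)
def pvScanB : List Char → List Char → List (List Char) → List (List Char)
  | [], run, pieces => if run.isEmpty then pieces else pieces ++ [pvMaskB run]
  | c :: rest, run, pieces =>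
    if PySem.Chars.isspace c then
      if run.isEmpty then pvScanB rest [] pieces
      else pvScanB rest [] (pieces ++ [pvMaskB run])
    else pvScanB rest (run ++ [c]) pieces

def hide_name_alt (name : String) : String :=
  String.ofList (PySem.Chars.join [' '] (pvScanB name.toList [] []))

-- ===== PRECONDITION & SPEC =====
def Spec_hide_name (name : String) (out : String) : Prop := out = hide_name_alt name
instance (name : String) (out : String) : Decidable (Spec_hide_name name out) := by unfold Spec_hide_name; infer_instance

-- ===== CLAIM (what is proved, stated in full; the proofs are below) =====
def Claim_equal_hide_name : Prop := ∀ (name : String), Dom_hide_name name → Spec_hide_name name (hide_name name)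

-- ===== LEMMAS AND PROOFS =====

-- B's scan over the characters equals A's split followed by per-word masking
theorem pvScanB_go (cs : List Char) : ∀ (cur : List Char) (acc : List (List Char)),
    pvScanB cs cur.reverse (acc.reverse.map pvMaskB) = (PySem.Chars.split₀.go cs cur acc).map pvMaskB := by
  induction cs with
  | nil =>
    intro cur acc
    simp only [pvScanB, PySem.Chars.split₀.go]
    by_cases h : cur.isEmpty
    · simp [h]
    · simp [h]
  | cons c rest ih =>
    intro cur acc
    simp only [pvScanB, PySem.Chars.split₀.go]
    by_cases hs : PySem.Chars.isspace c
    · by_cases h : cur.isEmpty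
      · simpa [hs, h] using ih [] acc
      · have := ih [] (cur.reverse :: acc)
        simpa [hs, h] using this
    · have := ih (c :: cur) acc
      simpa [hs] using this

theorem pvScanB_split₀ (cs : List Char) :
    pvScanB cs [] [] = (PySem.Chars.split₀ cs).map pvMaskB := by
  simpa using pvScanB_go cs [] []

-- A's append-fold is a map
theorem foldl_append_map (f : String → String) : ∀ (ws init : List String),
    ws.foldl (fun acc w => acc ++ [f w]) init = init ++ ws.map f
  | [], init => by simp
  | w :: ws, init => by
    simp [List.foldl_cons, foldl_append_map f ws (init ++ [f w])]

-- per-word: A's slice-built mask equals B's take/drop mask, on character lists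
theorem maskA_toList (w : String) :
    ((if PySem.Str.len w > 4 then
        PySem.Str.slice w none (some 2) ++ "***" ++ PySem.Str.slice w (some (-2)) none
      else w) : String).toList = pvMaskB w.toList := by
  by_cases hlen : 4 < w.toList.length
  · have h : PySem.Str.len w > 4 := by
      rw [PySem.Str.len_eq]; exact_mod_cast hlen
    rw [if_pos h]
    simp only [String.toList_append, PySem.Str.toList_slice]
    show PySem.List.slice w.toList none (some 2) ++ "***".toList ++
        PySem.List.slice w.toList (some (-2)) none = pvMaskB w.toList
    rw [PySem.List.slice_to w.toList (by omega), PySem.List.slice_from_neg_ofNat w.toList 2 (by omega)]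
    unfold pvMaskB
    rw [if_pos hlen]
    rfl
  · have h : ¬ PySem.Str.len w > 4 := by
      rw [PySem.Str.len_eq]; exact_mod_cast hlen
    rw [if_neg h]
    unfold pvMaskB
    rw [if_neg hlen]

-- ===== VERDICT (by name: the statement is the Claim_ definition above) =====
theorem hide_name_spec : Claim_equal_hide_name := by
  intro name _
  unfold Spec_hide_name hide_name hide_name_alt
  apply String.toList_inj.mp
  rw [pvScanB_split₀, ← PySem.Str.split₀_map_toList]
  simp only [foldl_append_map, List.nil_append, String.toList_ofList,
    PySem.Str.toList_join, List.map_map]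
  show PySem.Chars.join " ".toList _ = PySem.Chars.join [' '] _
  have hsep : " ".toList = [' '] := by decide
  rw [hsep]
  congr 1
  exact List.map_congr_left (fun w _ => maskA_toList w)
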